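-- pv_equiv track=rewrite | github.com/RitvikSharmaa/outreach-AI | backend/agents/contact_discovery.py | infer_department
-- ===== SOURCE A (Python) =====
-- def infer_department(title: str) -> str:
--     """Infer department from job title"""
--     title_lower = title.lower()
--
--     if any(word in title_lower for word in ['ceo', 'cto', 'cfo', 'chief', 'president', 'founder']):
--         return "Executive"
--     elif any(word in title_lower for word in ['sales', 'revenue', 'account']):
--         return "Sales"
--     elif any(word in title_lower for word in ['marketing', 'growth', 'brand']):
--         return "Marketing"
--     elif any(word in title_lower for word in ['product', 'pm']):
--         return "Product"
--     elif any(word in title_lower for word in ['engineering', 'developer', 'tech', 'software']):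
--         return "Engineering"
--     elif any(word in title_lower for word in ['partnership', 'business development', 'bd', 'bizdev']):
--         return "Partnerships"
--     else:
--         return "Other"
-- ===== SOURCE B (Python) =====
-- _DEPTS = ["Executive", "Sales", "Marketing", "Product", "Engineering", "Partnerships", "Other"]
--
-- _KEYWORD_RANK = [
--     ("ceo", 0), ("cto", 0), ("cfo", 0), ("chief", 0), ("president", 0), ("founder", 0),
--     ("sales", 1), ("revenue", 1), ("account", 1),
--     ("marketing", 2), ("growth", 2), ("brand", 2),
--     ("product", 3), ("pm", 3),
--     ("engineering", 4), ("developer", 4), ("tech", 4), ("software", 4),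
--     ("partnership", 5), ("business development", 5), ("bd", 5), ("bizdev", 5),
-- ]
--
-- def infer_department(title: str) -> str:
--     """Infer department from job title"""
--     t = title.lower()
--     best = len(_DEPTS) - 1  # rank of "Other"
--     for kw, rank in _KEYWORD_RANK:
--         if rank < best and kw in t:
--             best = rank
--     return _DEPTS[best]
-- ===== Notes on version B (the rewrite author's own statement) =====
-- stated objective: alternative
-- what changed: Replaces the if/elif chain of per-department any() tests with a single min-rank accumulation pass over a flat keyword-to-rank list (no early exit, no per-department test), indexing the result into a department array.
import Mathlib
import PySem

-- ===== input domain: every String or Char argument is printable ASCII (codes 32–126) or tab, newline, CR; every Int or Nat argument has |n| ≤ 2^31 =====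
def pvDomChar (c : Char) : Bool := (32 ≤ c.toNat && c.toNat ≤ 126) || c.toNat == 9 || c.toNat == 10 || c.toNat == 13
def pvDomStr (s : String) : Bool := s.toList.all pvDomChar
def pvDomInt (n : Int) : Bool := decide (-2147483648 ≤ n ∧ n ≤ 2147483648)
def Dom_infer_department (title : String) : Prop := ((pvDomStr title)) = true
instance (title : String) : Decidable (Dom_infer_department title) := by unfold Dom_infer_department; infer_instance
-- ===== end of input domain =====

-- B replaces A's if/elif chain of any() tests with a min-rank accumulation over a flat
-- keyword→rank list, indexing the result into a department array (alternative decomposition).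

-- ===== PORT A =====
def infer_department (title : String) : String :=
  let title_lower := PySem.Str.lower title
  if (["ceo", "cto", "cfo", "chief", "president", "founder"].any
        (fun word => PySem.Str.isIn word title_lower)) then "Executive"
  else if (["sales", "revenue", "account"].any
        (fun word => PySem.Str.isIn word title_lower)) then "Sales"
  else if (["marketing", "growth", "brand"].any
        (fun word => PySem.Str.isIn word title_lower)) then "Marketing"
  else if (["product", "pm"].any
        (fun word => PySem.Str.isIn word title_lower)) then "Product"
  else if (["engineering", "developer", "tech", "software"].any
        (fun word => PySem.Str.isIn word title_lower)) then "Engineering"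
  else if (["partnership", "business development", "bd", "bizdev"].any
        (fun word => PySem.Str.isIn word title_lower)) then "Partnerships"
  else "Other"

-- ===== PORT B =====
def DEPTS : List String :=
  ["Executive", "Sales", "Marketing", "Product", "Engineering", "Partnerships", "Other"]

def KEYWORD_RANK : List (String × Nat) :=
  [("ceo", 0), ("cto", 0), ("cfo", 0), ("chief", 0), ("president", 0), ("founder", 0),
   ("sales", 1), ("revenue", 1), ("account", 1),
   ("marketing", 2), ("growth", 2), ("brand", 2),
   ("product", 3), ("pm", 3),
   ("engineering", 4), ("developer", 4), ("tech", 4), ("software", 4),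
   ("partnership", 5), ("business development", 5), ("bd", 5), ("bizdev", 5)]

def infer_department_alt (title : String) : String :=
  let t := PySem.Str.lower title
  let best := KEYWORD_RANK.foldl
    (fun b p => if p.2 < b ∧ PySem.Str.isIn p.1 t = true then p.2 else b)
    (DEPTS.length - 1)
  DEPTS.getD best "Other"

-- ===== PRECONDITION & SPEC =====
def Spec_infer_department (title : String) (out : String) : Prop := out = infer_department_alt title
instance (title : String) (out : String) : Decidable (Spec_infer_department title out) := by unfold Spec_infer_department; infer_instance

-- ===== CLAIM (what is proved, stated in full; the proofs are below) =====
def Claim_equal_infer_department : Prop := ∀ (title : String), Dom_infer_department title → Spec_infer_department title (infer_department title)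

-- ===== LEMMAS AND PROOFS =====

-- A block of keywords sharing one rank r folds to "if r beats the accumulator and any keyword
-- matches, r; else the accumulator".
theorem fold_rank_block (r b0 : Nat) (t : String) (kws : List String) :
    (kws.map (fun k => (k, r))).foldl
      (fun b p => if p.2 < b ∧ PySem.Str.isIn p.1 t = true then p.2 else b) b0
    = if r < b0 ∧ kws.any (fun k => PySem.Str.isIn k t) = true then r else b0 := by
  induction kws generalizing b0 with
  | nil => simp
  | cons k ks ih =>
    simp only [List.map_cons, List.foldl_cons, List.any_cons, Bool.or_eq_true]
    rw [ih]
    split_ifs <;> simp_all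
    rename_i hA hB
    obtain ⟨x, hx, hxt⟩ := hB.2
    simp [hA x hx] at hxt

theorem infer_department_spec : Claim_equal_infer_department := by
  intro title _
  unfold Spec_infer_department infer_department infer_department_alt
  have hK : KEYWORD_RANK =
      (["ceo", "cto", "cfo", "chief", "president", "founder"].map (fun k => (k, 0)))
      ++ (["sales", "revenue", "account"].map (fun k => (k, 1)))
      ++ (["marketing", "growth", "brand"].map (fun k => (k, 2)))
      ++ (["product", "pm"].map (fun k => (k, 3)))
      ++ (["engineering", "developer", "tech", "software"].map (fun k => (k, 4)))
      ++ (["partnership", "business development", "bd", "bizdev"].map (fun k => (k, 5))) := rfl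
  rw [hK]
  simp only [List.foldl_append, fold_rank_block]
  generalize (List.any ["ceo", "cto", "cfo", "chief", "president", "founder"]
      (fun w => PySem.Str.isIn w (PySem.Str.lower title))) = b1
  generalize (List.any ["sales", "revenue", "account"]
      (fun w => PySem.Str.isIn w (PySem.Str.lower title))) = b2
  generalize (List.any ["marketing", "growth", "brand"]
      (fun w => PySem.Str.isIn w (PySem.Str.lower title))) = b3
  generalize (List.any ["product", "pm"]
      (fun w => PySem.Str.isIn w (PySem.Str.lower title))) = b4
  generalize (List.any ["engineering", "developer", "tech", "software"]
      (fun w => PySem.Str.isIn w (PySem.Str.lower title))) = b5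
  generalize (List.any ["partnership", "business development", "bd", "bizdev"]
      (fun w => PySem.Str.isIn w (PySem.Str.lower title))) = b6
  cases b1 <;> cases b2 <;> cases b3 <;> cases b4 <;> cases b5 <;> cases b6 <;> rfl
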